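-- pv_equiv track=rewrite | github.com/AdityaV-ice/PythonWorks | 1.py | can_defeat_villains
-- ===== SOURCE A (Python) =====
-- def can_defeat_villains(start_index, villains, H, M):
--     hero_health = H
--     hero_count = M
--
--     for i in range(start_index, len(villains)):
--         villain_health = villains[i]
--         if hero_health > villain_health:
--             hero_health -= villain_health
--         elif hero_health == villain_health:
--             hero_health = H
--         else:
--             hero_count -= 1
--             if hero_count <= 0:
--                 return False
--             hero_health = H - villain_health
--     return True
-- ===== SOURCE B (Python) =====
-- def can_defeat_villains(start_index, villains, H, M):
--     # Divide-and-conquer over the index range [lo, hi): fight the left half,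
--     # and if the heroes survive, continue on the right half with the state
--     # the left half produced.  Recursion depth is O(log n), so deep lists
--     # never hit the recursion limit.  Returns the surviving (health, count)
--     # or None once the heroes are wiped out.
--     def fight(lo, hi, health, count):
--         if hi - lo == 1:
--             v = villains[lo]
--             if health > v:
--                 return (health - v, count)
--             if health == v:
--                 return (H, count)
--             if count <= 1:
--                 return None
--             return (H - v, count - 1)
--         mid = (lo + hi) // 2
--         state = fight(lo, mid, health, count)
--         if state is None:
--             return None
--         return fight(mid, hi, state[0], state[1])
--
--     if start_index >= len(villains):
--         return True
--     return fight(start_index, len(villains), H, M) is not None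
-- ===== Notes on version B (the rewrite author's own statement) =====
-- stated objective: alternative
-- what changed: A simulates with a single left-to-right indexed loop mutating hero_health/hero_count and an early return; B is a divide-and-conquer recursion over the index range [start_index, len) that threads the (health, count) state through the two halves and propagates None on defeat (depth O(log n), so deep lists never hit the recursion limit); Pre_ excludes only start_index < -len(villains), where A raises IndexError.
import Mathlib
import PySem

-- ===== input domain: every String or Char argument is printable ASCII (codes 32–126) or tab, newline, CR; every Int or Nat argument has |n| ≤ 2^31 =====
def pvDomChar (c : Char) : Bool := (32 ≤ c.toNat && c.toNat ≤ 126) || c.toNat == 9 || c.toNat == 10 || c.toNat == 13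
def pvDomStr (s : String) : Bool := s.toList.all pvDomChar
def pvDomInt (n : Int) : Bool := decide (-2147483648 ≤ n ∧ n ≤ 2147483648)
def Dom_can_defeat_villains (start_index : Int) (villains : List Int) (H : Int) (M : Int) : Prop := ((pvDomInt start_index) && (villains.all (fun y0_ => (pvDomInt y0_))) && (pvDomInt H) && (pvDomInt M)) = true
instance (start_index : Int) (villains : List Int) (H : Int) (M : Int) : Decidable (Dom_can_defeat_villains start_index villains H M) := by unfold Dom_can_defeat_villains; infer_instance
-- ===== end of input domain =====

-- B replaces A's left-to-right indexed loop by a divide-and-conquer recursion over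
-- the index range [start_index, len) that threads the (health, count) state and
-- propagates None on defeat (alternative decomposition, same O(n) cost).


-- ===== PORT A =====
-- A's for-loop over range(start_index, len(villains)); pyGet? none = IndexError
-- (mapped to an arbitrary `false`; such inputs are excluded by Pre_)
def canA_loop (villains : List Int) (H : Int) : List Int → Int → Int → Bool
  | [], _, _ => true
  | i :: rest, hero_health, hero_count =>
    match PySem.List.pyGet? villains i with
    | none => false
    | some villain_health =>
      if hero_health > villain_health then
        canA_loop villains H rest (hero_health - villain_health) hero_count
      else if hero_health = villain_health then
        canA_loop villains H rest H hero_count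
      else if hero_count - 1 ≤ 0 then false
      else canA_loop villains H rest (H - villain_health) (hero_count - 1)

def can_defeat_villains (start_index : Int) (villains : List Int) (H : Int) (M : Int) : Bool :=
  canA_loop villains H (PySem.List.pyRange start_index (villains.length : Int) 1) H M

-- ===== PORT B =====
-- B's inner `fight(lo, hi, health, count)`: divide and conquer on [lo, hi).
-- The `hi - lo ≤ 0` guard only makes the recursion total (Python's fight is
-- never called with an empty range); pyGet? none = IndexError, excluded by Pre_.
def fightB (villains : List Int) (H : Int) (lo hi health count : Int) : Option (Int × Int) :=
  if hi - lo ≤ 0 then none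
  else if hi - lo = 1 then
    match PySem.List.pyGet? villains lo with
    | none => none
    | some v =>
      if health > v then some (health - v, count)
      else if health = v then some (H, count)
      else if count ≤ 1 then none
      else some (H - v, count - 1)
  else
    match fightB villains H lo (PySem.Int.floordiv (lo + hi) 2) health count with
    | none => none
    | some s => fightB villains H (PySem.Int.floordiv (lo + hi) 2) hi s.1 s.2
termination_by (hi - lo).toNat
decreasing_by
  all_goals
    rw [PySem.Int.floordiv_eq_ediv_of_pos (by norm_num : (0:Int) < 2)]
    omega

def can_defeat_villains_alt (start_index : Int) (villains : List Int) (H : Int) (M : Int) : Bool :=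
  if start_index ≥ (villains.length : Int) then true
  else (fightB villains H start_index (villains.length : Int) H M).isSome

-- ===== PRECONDITION & SPEC =====
-- Pre_ excludes exactly the inputs on which A raises IndexError: start_index < -len(villains)
-- makes the first access villains[start_index] raise (B raises there too).
def Pre_can_defeat_villains (start_index : Int) (villains : List Int) (H : Int) (M : Int) : Prop :=
  -(villains.length : Int) ≤ start_index
instance (start_index : Int) (villains : List Int) (H : Int) (M : Int) : Decidable (Pre_can_defeat_villains start_index villains H M) := by unfold Pre_can_defeat_villains; infer_instance

def pvWitness_can_defeat_villains : Int × List Int × Int × Int := (0, [2, 3], 5, 1)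

def Spec_can_defeat_villains (start_index : Int) (villains : List Int) (H : Int) (M : Int) (out : Bool) : Prop := out = can_defeat_villains_alt start_index villains H M
instance (start_index : Int) (villains : List Int) (H : Int) (M : Int) (out : Bool) : Decidable (Spec_can_defeat_villains start_index villains H M out) := by unfold Spec_can_defeat_villains; infer_instance

-- ===== CLAIM (what is proved, stated in full; the proofs are below) =====
def Claim_equal_can_defeat_villains : Prop := ∀ (start_index : Int) (villains : List Int) (H : Int) (M : Int), Dom_can_defeat_villains start_index villains H M → Pre_can_defeat_villains start_index villains H M → Spec_can_defeat_villains start_index villains H M (can_defeat_villains start_index villains H M)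

-- ===== LEMMAS AND PROOFS =====

-- common sequential reference semantics over an explicit index list
def simIdx (villains : List Int) (H : Int) : List Int → Int → Int → Option (Int × Int)
  | [], h, c => some (h, c)
  | i :: rest, h, c =>
    match PySem.List.pyGet? villains i with
    | none => none
    | some v =>
      if h > v then simIdx villains H rest (h - v) c
      else if h = v then simIdx villains H rest H c
      else if c ≤ 1 then none
      else simIdx villains H rest (H - v) (c - 1)

lemma canA_eq_simIdx (villains : List Int) (H : Int) :
    ∀ (idxs : List Int) (h c : Int),
      canA_loop villains H idxs h c = (simIdx villains H idxs h c).isSome := by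
  intro idxs
  induction idxs with
  | nil => intro h c; simp [canA_loop, simIdx]
  | cons i rest ih =>
    intro h c
    simp only [canA_loop, simIdx]
    cases PySem.List.pyGet? villains i with
    | none => simp
    | some v =>
      simp only
      by_cases h1 : h > v
      · simp only [if_pos h1]; exact ih _ _
      · by_cases h2 : h = v
        · simp only [if_neg h1, if_pos h2]; exact ih _ _
        · by_cases hc : c ≤ 1
          · simp only [if_neg h1, if_neg h2, if_pos (show c - 1 ≤ 0 by omega), if_pos hc]
            simp
          · simp only [if_neg h1, if_neg h2, if_neg (show ¬ c - 1 ≤ 0 by omega), if_neg hc]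
            exact ih _ _

lemma simIdx_append (villains : List Int) (H : Int) :
    ∀ (l1 l2 : List Int) (h c : Int),
      simIdx villains H (l1 ++ l2) h c
        = (simIdx villains H l1 h c).bind (fun s => simIdx villains H l2 s.1 s.2) := by
  intro l1
  induction l1 with
  | nil => intro l2 h c; simp [simIdx]
  | cons i rest ih =>
    intro l2 h c
    simp only [List.cons_append, simIdx]
    cases PySem.List.pyGet? villains i with
    | none => simp
    | some v =>
      simp only
      split_ifs <;> first | apply ih | simp

lemma pyRange_one_split : ∀ (n : Nat) (a b c : Int), (b - a).toNat = n → a ≤ b → b ≤ c →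
    PySem.List.pyRange a c 1 = PySem.List.pyRange a b 1 ++ PySem.List.pyRange b c 1 := by
  intro n
  induction n with
  | zero =>
    intro a b c hn hab hbc
    have hba : b = a := by omega
    rw [hba, PySem.List.pyRange_one_eq_nil (le_refl a)]
    simp
  | succ k ih =>
    intro a b c hn hab hbc
    have hlt : a < b := by omega
    rw [PySem.List.pyRange_one_cons (by omega : a < c),
        PySem.List.pyRange_one_cons hlt,
        ih (a + 1) b c (by omega) (by omega) hbc]
    simp

lemma fightB_eq_simIdx (villains : List Int) (H : Int) :
    ∀ (n : Nat) (lo hi h c : Int), (hi - lo).toNat = n → 1 ≤ hi - lo →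
      fightB villains H lo hi h c = simIdx villains H (PySem.List.pyRange lo hi 1) h c := by
  intro n
  induction n using Nat.strong_induction_on with
  | _ n ih =>
    intro lo hi h c hn hge
    rw [fightB]
    by_cases hone : hi - lo = 1
    · have hhi : hi = lo + 1 := by omega
      subst hhi
      rw [PySem.List.pyRange_one_singleton]
      simp only [if_neg (by omega : ¬ (lo + 1 - lo ≤ 0)), if_pos (by omega : lo + 1 - lo = 1)]
      simp only [simIdx]
    · have h2 : 2 ≤ hi - lo := by omega
      have hmid : PySem.Int.floordiv (lo + hi) 2 = (lo + hi) / 2 :=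
        PySem.Int.floordiv_eq_ediv_of_pos (by norm_num)
      have hlom : lo + 1 ≤ (lo + hi) / 2 := by omega
      have hmhi : (lo + hi) / 2 + 1 ≤ hi := by omega
      simp only [if_neg (by omega : ¬ (hi - lo ≤ 0)), if_neg hone, hmid]
      rw [pyRange_one_split (((lo + hi) / 2 - lo).toNat) lo ((lo + hi) / 2) hi rfl
            (by omega) (by omega),
          simIdx_append]
      rw [ih (((lo + hi) / 2 - lo).toNat) (by omega) lo ((lo + hi) / 2) h c rfl (by omega)]
      cases simIdx villains H (PySem.List.pyRange lo ((lo + hi) / 2) 1) h c with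
      | none => rfl
      | some s =>
        simp only [Option.bind_some]
        exact ih ((hi - (lo + hi) / 2).toNat) (by omega) ((lo + hi) / 2) hi s.1 s.2 rfl (by omega)

-- ===== VERDICT (by name: the statement is the Claim_ definition above) =====
theorem can_defeat_villains_spec : Claim_equal_can_defeat_villains := by
  intro start_index villains H M _hdom _hpre
  unfold Spec_can_defeat_villains can_defeat_villains can_defeat_villains_alt
  rw [canA_eq_simIdx]
  by_cases hbig : start_index ≥ (villains.length : Int)
  · rw [if_pos hbig, PySem.List.pyRange_one_eq_nil hbig]
    simp [simIdx]
  · rw [if_neg hbig,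
        fightB_eq_simIdx villains H (((villains.length : Int) - start_index).toNat)
          start_index (villains.length : Int) H M rfl (by omega)]
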